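-- pv_equiv track=rewrite | github.com/meszon/adventjs-2025 | day9.py | move_reno2
-- ===== SOURCE A (Python) =====
-- from typing import List, Literal
--
-- def move_reno2(board: str, moves: str) -> Literal['fail', 'crash', 'success']:
--
--   line_board = [line for line in board.split('\n') if line != '']
--   char_board = [list(line) for line in line_board]
--
--   robot_posX = -1
--   robot_posY = -1
--
--   for posY, line in enumerate(char_board):
--     for posX, char in enumerate(line):
--       if char == '@':
--         robot_posX = posX
--         robot_posY = posY
--         break
--     if robot_posX != -1 and robot_posY != -1:
--       break
--
--   for movement in moves:
--     if movement == 'R':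
--       robot_posX += 1
--     elif movement == 'L':
--       robot_posX -= 1
--     elif movement == 'U':
--       robot_posY -= 1
--     elif movement == 'D':
--       robot_posY += 1
--
--     if robot_posX < 0 or robot_posY < 0 or robot_posX >= len(char_board[0]) or robot_posY >= len(char_board):
--       return 'crash'
--
--     if char_board[robot_posY][robot_posX] == '*':
--       return 'success'
--     elif char_board[robot_posY][robot_posX] == '#':
--       return 'crash'
--
--   return 'fail'
-- ===== SOURCE B (Python) =====
-- STEP = {'R': (1, 0), 'L': (-1, 0), 'U': (0, -1), 'D': (0, 1)}
--
-- def move_reno2(board, moves):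
--     rows = [line for line in board.split('\n') if line != '']
--     start = next(((x, y) for y, row in enumerate(rows)
--                   for x, c in enumerate(row) if c == '@'), (-1, -1))
--     # first pass: the position after each move (unknown chars leave it unchanged)
--     path = []
--     x, y = start
--     for m in moves:
--         dx, dy = STEP.get(m, (0, 0))
--         x, y = x + dx, y + dy
--         path.append((x, y))
--     # second pass: first verdict along the path
--     for (px, py) in path:
--         if px < 0 or py < 0 or py >= len(rows) or px >= len(rows[0]):
--             return 'crash'
--         cell = rows[py][px]
--         if cell == '*':
--             return 'success'
--         if cell == '#':
--             return 'crash'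
--     return 'fail'
-- ===== Notes on version B (the rewrite author's own statement) =====
-- stated objective: alternative
-- what changed: B replaces A's fused simulate-and-check loop (sentinel-based nested robot search, if/elif position updates with inline bound/cell checks) by a delta-table + two-pass pipeline: a next() generator finds the robot, a first pass precomputes the whole position path, and a second pass scans that path for the first crash/success verdict.
-- outside the precondition, e.g. on move_reno2('@.\n#', 'D'): A returns 'crash', B returns 'crash'
import Mathlib
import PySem

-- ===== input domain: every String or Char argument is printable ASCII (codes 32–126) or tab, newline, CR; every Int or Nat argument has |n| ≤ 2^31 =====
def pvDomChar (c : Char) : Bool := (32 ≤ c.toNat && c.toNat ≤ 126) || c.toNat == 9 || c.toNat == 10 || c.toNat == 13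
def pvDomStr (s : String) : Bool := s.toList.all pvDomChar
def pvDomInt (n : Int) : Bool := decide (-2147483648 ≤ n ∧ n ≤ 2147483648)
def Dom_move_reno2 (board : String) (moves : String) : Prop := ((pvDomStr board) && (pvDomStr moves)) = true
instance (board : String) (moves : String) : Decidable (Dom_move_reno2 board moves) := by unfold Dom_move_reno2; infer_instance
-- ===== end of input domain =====

-- B rewrites A's fused simulate-and-check loop as a delta-table + precomputed position path scanned in a second pass; alternative decomposition, same cost.

-- ===== PORT A =====
-- inner 'for posX, char in enumerate(line): if char == '@': …; break'
def aInner : List Char → Nat → Nat → Int × Int → Int × Int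
  | [], _, _, st => st
  | c :: rest, posX, posY, st =>
    if c = '@' then ((posX : Int), (posY : Int)) else aInner rest (posX + 1) posY st

-- outer 'for posY, line in enumerate(char_board): …; if robot_posX != -1 and robot_posY != -1: break'
def aOuter : List (List Char) → Nat → Int × Int → Int × Int
  | [], _, st => st
  | l :: rest, posY, st =>
    let st' := aInner l 0 posY st
    if st'.1 ≠ -1 ∧ st'.2 ≠ -1 then st' else aOuter rest (posY + 1) st'

-- 'for movement in moves: …' — the getD defaults are reached only where Python raises IndexError (excluded by Pre_)
def aLoop (charBoard : List (List Char)) : List Char → Int → Int → String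
  | [], _, _ => "fail"
  | m :: ms, robot_posX, robot_posY =>
    let p : Int × Int :=
      if m = 'R' then (robot_posX + 1, robot_posY)
      else if m = 'L' then (robot_posX - 1, robot_posY)
      else if m = 'U' then (robot_posX, robot_posY - 1)
      else if m = 'D' then (robot_posX, robot_posY + 1)
      else (robot_posX, robot_posY)
    if p.1 < 0 ∨ p.2 < 0 ∨ p.1 ≥ ((charBoard.getD 0 []).length : Int) ∨ p.2 ≥ (charBoard.length : Int)
    then "crash"
    else
      let cell := (charBoard.getD p.2.toNat []).getD p.1.toNat ' '
      if cell = '*' then "success"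
      else if cell = '#' then "crash"
      else aLoop charBoard ms p.1 p.2

-- board.split('\n') on the char level: PySem.Chars.splitOn; list(line) is the identity on List Char
def move_reno2 (board : String) (moves : String) : String :=
  let line_board := (PySem.Chars.splitOn board.toList ['\n']).filter (· ≠ [])
  let char_board := line_board
  let st := aOuter char_board 0 (-1, -1)
  aLoop char_board moves.toList st.1 st.2

-- ===== PORT B =====
def bStep (m : Char) : Int × Int :=
  if m = 'R' then (1, 0) else if m = 'L' then (-1, 0)
  else if m = 'U' then (0, -1) else if m = 'D' then (0, 1) else (0, 0)

-- the 'next(generator, (-1,-1))' robot search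
def bRowFind : List Char → Nat → Option Nat
  | [], _ => none
  | c :: r, i => if c = '@' then some i else bRowFind r (i + 1)

def bFind : List (List Char) → Nat → Int × Int
  | [], _ => (-1, -1)
  | row :: rest, y =>
    match bRowFind row 0 with
    | some x => ((x : Int), (y : Int))
    | none => bFind rest (y + 1)

-- first pass: 'path.append((x, y))' loop
def bPath : List Char → Int × Int → List (Int × Int) → List (Int × Int)
  | [], _, acc => acc
  | m :: ms, p, acc =>
    let d := bStep m
    let p' := (p.1 + d.1, p.2 + d.2)
    bPath ms p' (acc ++ [p'])

-- second pass over the path; getD defaults reached only where Python raises (excluded by Pre_)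
def bScan (rows : List (List Char)) : List (Int × Int) → String
  | [] => "fail"
  | p :: rest =>
    if p.1 < 0 ∨ p.2 < 0 ∨ p.2 ≥ (rows.length : Int) ∨ p.1 ≥ ((rows.getD 0 []).length : Int)
    then "crash"
    else
      let cell := (rows.getD p.2.toNat []).getD p.1.toNat ' '
      if cell = '*' then "success"
      else if cell = '#' then "crash"
      else bScan rows rest

def move_reno2_alt (board : String) (moves : String) : String :=
  let rows := (PySem.Chars.splitOn board.toList ['\n']).filter (· ≠ [])
  let start := bFind rows 0
  bScan rows (bPath moves.toList start [])

-- ===== PRECONDITION & SPEC =====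
-- Pre_ excludes ragged boards that contain '@' and get nonempty moves: there A's bounds check
-- (width of row 0 only) can let the robot index past a shorter row and raise IndexError.
def Pre_move_reno2 (board : String) (moves : String) : Prop :=
  moves = "" ∨ '@' ∉ board.toList ∨
    (∀ l ∈ (PySem.Chars.splitOn board.toList ['\n']).filter (· ≠ []),
      l.length = (((PySem.Chars.splitOn board.toList ['\n']).filter (· ≠ [])).headD []).length)
instance (board : String) (moves : String) : Decidable (Pre_move_reno2 board moves) := by
  unfold Pre_move_reno2; infer_instance
def pvWitness_move_reno2 : String × String := ("@.\n.*", "DR")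

def Spec_move_reno2 (board : String) (moves : String) (out : String) : Prop := out = move_reno2_alt board moves
instance (board : String) (moves : String) (out : String) : Decidable (Spec_move_reno2 board moves out) := by unfold Spec_move_reno2; infer_instance

-- ===== CLAIM (what is proved, stated in full; the proofs are below) =====
def Claim_equal_move_reno2 : Prop := ∀ (board : String) (moves : String), Dom_move_reno2 board moves → Pre_move_reno2 board moves → Spec_move_reno2 board moves (move_reno2 board moves)

-- ===== LEMMAS AND PROOFS =====

theorem aInner_eq (l : List Char) (i posY : Nat) :
    aInner l i posY (-1, -1) =
      (match bRowFind l i with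
       | some x => ((x : Int), (posY : Int))
       | none => ((-1 : Int), (-1 : Int))) := by
  induction l generalizing i with
  | nil => rfl
  | cons c r ih =>
    simp only [aInner, bRowFind]
    by_cases h : c = '@' <;> simp [h, ih]

theorem find_eq (lines : List (List Char)) (y : Nat) :
    aOuter lines y (-1, -1) = bFind lines y := by
  induction lines generalizing y with
  | nil => rfl
  | cons l rest ih =>
    simp only [aOuter, bFind, aInner_eq]
    cases h : bRowFind l 0 with
    | some x =>
      have hx : ((x : Int)) ≠ -1 := by omega
      have hy : ((y : Int)) ≠ -1 := by omega
      simp [hx, hy]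
    | none =>
      simp [ih]

theorem bPath_acc (ms : List Char) (p : Int × Int) (acc : List (Int × Int)) :
    bPath ms p acc = acc ++ bPath ms p [] := by
  induction ms generalizing p acc with
  | nil => simp [bPath]
  | cons m ms ih =>
    simp only [bPath, List.nil_append]
    rw [ih, ih (acc := [_])]
    simp

theorem loop_eq (rows : List (List Char)) (ms : List Char) (x y : Int) :
    aLoop rows ms x y = bScan rows (bPath ms (x, y) []) := by
  induction ms generalizing x y with
  | nil => rfl
  | cons m ms ih =>
    have hstep :
        (if m = 'R' then (x + 1, y)
         else if m = 'L' then (x - 1, y)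
         else if m = 'U' then (x, y - 1)
         else if m = 'D' then (x, y + 1)
         else (x, y)) = (x + (bStep m).1, y + (bStep m).2) := by
      simp only [bStep]; split_ifs <;> simp <;> omega
    rw [show bPath (m :: ms) (x, y) [] =
          (x + (bStep m).1, y + (bStep m).2) :: bPath ms (x + (bStep m).1, y + (bStep m).2) [] by
        simp only [bPath]; rw [bPath_acc]; simp]
    simp only [aLoop, bScan, hstep]
    split_ifs <;> first | rfl | (exact ih _ _) | omega

-- ===== VERDICT (by name: the statement is the Claim_ definition above) =====
theorem move_reno2_spec : Claim_equal_move_reno2 := by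
  intro board moves _ _
  unfold Spec_move_reno2 move_reno2 move_reno2_alt
  dsimp only
  rw [find_eq, loop_eq, Prod.mk.eta]
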